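-- pv_equiv track=rewrite | github.com/Nubiru/bhaskara | conversion_numerica.py | agrupar_binario
-- ===== SOURCE A (Python) =====
-- def agrupar_binario(bits: str, tam: int, izquierda=True) -> list[str]:
--     """Agrupa una cadena de bits en bloques de tamaño tam,
--     padding con ceros a la izquierda (parte entera) o derecha (fracción)."""
--     if not bits:
--         return []
--     if izquierda:
--         # parte entera: rellenar a la izquierda
--         resto = len(bits) % tam
--         if resto:
--             bits = "0" * (tam - resto) + bits
--         return [bits[i:i+tam] for i in range(0, len(bits), tam)]
--     else:
--         # parte fracc: rellenar a la derecha
--         resto = len(bits) % tam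
--         if resto:
--             bits = bits + "0" * (tam - resto)
--         return [bits[i:i+tam] for i in range(0, len(bits), tam)]
-- ===== SOURCE B (Python) =====
-- def agrupar_binario(bits: str, tam: int, izquierda=True) -> list[str]:
--     """Slice into blocks directly and pad only the one incomplete block:
--     walk the string from the end (izquierda) or the start (fraction),
--     no pre-padding and no modulo."""
--     if not bits:
--         return []
--     blocks = []
--     if izquierda:
--         i = len(bits)
--         while i > tam:
--             blocks.append(bits[i - tam:i])
--             i -= tam
--         blocks.append("0" * (tam - i) + bits[:i])
--         blocks.reverse()
--     else:
--         i = 0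
--         while len(bits) - i > tam:
--             blocks.append(bits[i:i + tam])
--             i += tam
--         blocks.append(bits[i:] + "0" * (tam - (len(bits) - i)))
--     return blocks
-- ===== Notes on version B (the rewrite author's own statement) =====
-- stated objective: alternative
-- what changed: Instead of pre-padding the whole string with a modulo computation and then slicing uniformly, B walks the string once collecting blocks directly (from the end for izquierda, then reversing; from the start otherwise) and pads only the single incomplete block.
-- outside the precondition, e.g. on agrupar_binario('01', -2, True): A returns [], B does not finish within the time limit
import Mathlib
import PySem

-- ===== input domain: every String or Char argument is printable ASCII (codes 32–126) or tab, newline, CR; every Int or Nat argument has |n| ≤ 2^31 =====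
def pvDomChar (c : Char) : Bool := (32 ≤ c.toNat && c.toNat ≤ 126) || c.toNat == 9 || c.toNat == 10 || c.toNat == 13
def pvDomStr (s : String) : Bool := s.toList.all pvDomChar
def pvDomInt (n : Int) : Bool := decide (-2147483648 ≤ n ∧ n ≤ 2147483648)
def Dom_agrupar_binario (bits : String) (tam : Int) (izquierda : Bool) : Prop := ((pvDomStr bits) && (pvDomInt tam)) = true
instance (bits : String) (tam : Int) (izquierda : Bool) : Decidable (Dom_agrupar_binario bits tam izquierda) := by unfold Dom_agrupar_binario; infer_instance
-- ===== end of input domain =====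

-- B chops the bit string into blocks directly by recursion and pads only the single
-- incomplete block, instead of A's pre-padding of the whole string followed by uniform slicing
-- (objective: alternative decomposition, same cost).


-- ===== PORT A =====
def agrupar_binario (bits : String) (tam : Int) (izquierda : Bool) : List String :=
  let cs := bits.toList
  if cs = [] then []
  else if izquierda then
    -- resto = len(bits) % tam; if resto: bits = "0"*(tam-resto) + bits
    let resto := PySem.Int.mod (cs.length : Int) tam
    let cs2 := if resto ≠ 0 then List.replicate (tam - resto).toNat '0' ++ cs else cs
    (PySem.List.pyRange 0 (cs2.length : Int) tam).map
      (fun i => String.ofList (PySem.List.slice cs2 (some i) (some (i + tam))))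
  else
    -- resto = len(bits) % tam; if resto: bits = bits + "0"*(tam-resto)
    let resto := PySem.Int.mod (cs.length : Int) tam
    let cs2 := if resto ≠ 0 then cs ++ List.replicate (tam - resto).toNat '0' else cs
    (PySem.List.pyRange 0 (cs2.length : Int) tam).map
      (fun i => String.ofList (PySem.List.slice cs2 (some i) (some (i + tam))))

-- ===== PORT B =====
-- loop for izquierda: append blocks right-to-left, pad the final (leftmost) short block, reverse.
-- (the 'tam ≤ 0' disjunct is only a totality guard: Python B's loop does not terminate there,
-- and those inputs are outside Pre_.)
def pvLoopL (cs : List Char) (tam : Int) (i : Nat) (blocks : List (List Char)) : List (List Char) :=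
  if _h : (i : Int) ≤ tam ∨ tam ≤ 0 then
    (blocks ++ [List.replicate (tam - (i : Int)).toNat '0' ++ cs.take i]).reverse
  else
    pvLoopL cs tam (i - tam.toNat) (blocks ++ [(cs.drop (i - tam.toNat)).take tam.toNat])
termination_by i
decreasing_by omega

-- loop for not izquierda: append blocks left-to-right, pad the final (rightmost) short block.
def pvLoopR (cs : List Char) (tam : Int) (i : Nat) (blocks : List (List Char)) : List (List Char) :=
  if _h : (cs.length : Int) - (i : Int) ≤ tam ∨ tam ≤ 0 then
    blocks ++ [cs.drop i ++ List.replicate (tam - ((cs.length : Int) - (i : Int))).toNat '0']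
  else
    pvLoopR cs tam (i + tam.toNat) (blocks ++ [(cs.drop i).take tam.toNat])
termination_by cs.length - i
decreasing_by omega

def agrupar_binario_alt (bits : String) (tam : Int) (izquierda : Bool) : List String :=
  let cs := bits.toList
  if cs = [] then []
  else if izquierda then (pvLoopL cs tam cs.length []).map String.ofList
  else (pvLoopR cs tam 0 []).map String.ofList

-- ===== PRECONDITION & SPEC =====
-- Pre_ excludes tam ≤ 0 with nonempty bits: for tam = 0 A raises ZeroDivisionError; for tam < 0
-- A's range-with-negative-step accidentally yields [] while B's recursion does not terminate
-- (negative block sizes are outside the function's natural domain).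
def Pre_agrupar_binario (bits : String) (tam : Int) (izquierda : Bool) : Prop :=
  bits.toList = [] ∨ 1 ≤ tam
instance (bits : String) (tam : Int) (izquierda : Bool) : Decidable (Pre_agrupar_binario bits tam izquierda) := by unfold Pre_agrupar_binario; infer_instance

def pvWitness_agrupar_binario : String × Int × Bool := ("10110", 3, true)

def Spec_agrupar_binario (bits : String) (tam : Int) (izquierda : Bool) (out : List String) : Prop := out = agrupar_binario_alt bits tam izquierda
instance (bits : String) (tam : Int) (izquierda : Bool) (out : List String) : Decidable (Spec_agrupar_binario bits tam izquierda out) := by unfold Spec_agrupar_binario; infer_instance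

-- ===== CLAIM (what is proved, stated in full; the proofs are below) =====
def Claim_equal_agrupar_binario : Prop := ∀ (bits : String) (tam : Int) (izquierda : Bool), Dom_agrupar_binario bits tam izquierda → Pre_agrupar_binario bits tam izquierda → Spec_agrupar_binario bits tam izquierda (agrupar_binario bits tam izquierda)

-- ===== LEMMAS AND PROOFS =====

-- proof-only characterisations of the two loops (blocks in final order, no accumulator)
def pvChunksL (cs : List Char) (tam : Int) (i : Nat) : List (List Char) :=
  if _h : (i : Int) ≤ tam ∨ tam ≤ 0 then
    [List.replicate (tam - (i : Int)).toNat '0' ++ cs.take i]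
  else
    pvChunksL cs tam (i - tam.toNat) ++ [(cs.drop (i - tam.toNat)).take tam.toNat]
termination_by i
decreasing_by omega

def pvChunksR (cs : List Char) (tam : Int) (i : Nat) : List (List Char) :=
  if _h : (cs.length : Int) - (i : Int) ≤ tam ∨ tam ≤ 0 then
    [cs.drop i ++ List.replicate (tam - ((cs.length : Int) - (i : Int))).toNat '0']
  else
    (cs.drop i).take tam.toNat :: pvChunksR cs tam (i + tam.toNat)
termination_by cs.length - i
decreasing_by omega

theorem pvLoopL_eq (cs : List Char) (tam : Int) (i : Nat) (blocks : List (List Char)) :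
    pvLoopL cs tam i blocks = pvChunksL cs tam i ++ blocks.reverse := by
  by_cases h : (i : Int) ≤ tam ∨ tam ≤ 0
  · rw [pvLoopL, dif_pos h, pvChunksL, dif_pos h]
    simp
  · rw [pvLoopL, dif_neg h, pvChunksL, dif_neg h]
    rw [pvLoopL_eq cs tam (i - tam.toNat) (blocks ++ [(cs.drop (i - tam.toNat)).take tam.toNat])]
    simp
termination_by i
decreasing_by omega

theorem pvLoopR_eq (cs : List Char) (tam : Int) (i : Nat) (blocks : List (List Char)) :
    pvLoopR cs tam i blocks = blocks ++ pvChunksR cs tam i := by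
  by_cases h : (cs.length : Int) - (i : Int) ≤ tam ∨ tam ≤ 0
  · rw [pvLoopR, dif_pos h, pvChunksR, dif_pos h]
  · rw [pvLoopR, dif_neg h, pvChunksR, dif_neg h]
    rw [pvLoopR_eq cs tam (i + tam.toNat) (blocks ++ [(cs.drop i).take tam.toNat])]
    simp
termination_by cs.length - i
decreasing_by omega

def pvChop (t : Nat) (ds : List Char) : List (List Char) :=
  if _h : 0 < t ∧ ds ≠ [] then ds.take t :: pvChop t (ds.drop t) else []
termination_by ds.length
decreasing_by
  rcases _h with ⟨ht, hne⟩
  have : ds.length ≠ 0 := fun h => hne (List.eq_nil_of_length_eq_zero h)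
  simp [List.length_drop]; omega

theorem pvChop_cons (t : Nat) (ht : 0 < t) (ds : List Char) (hne : ds ≠ []) :
    pvChop t ds = ds.take t :: pvChop t (ds.drop t) := by
  rw [pvChop]; simp [ht, hne]

theorem pvChop_nil (t : Nat) : pvChop t [] = [] := by
  rw [pvChop]; simp

theorem pvChop_full (t : Nat) (ht : 0 < t) (ds : List Char) (hlen : ds.length = t) :
    pvChop t ds = [ds] := by
  have hne : ds ≠ [] := by intro h; subst h; simp at hlen; omega
  rw [pvChop_cons t ht ds hne]
  have h1 : ds.take t = ds := List.take_of_length_le (by omega)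
  have h2 : ds.drop t = [] := List.drop_eq_nil_of_le (by omega)
  rw [h1, h2, pvChop_nil]

theorem pvChop_append (t : Nat) (ht : 0 < t) (xs ys : List Char) (hdvd : t ∣ xs.length) :
    pvChop t (xs ++ ys) = pvChop t xs ++ pvChop t ys := by
  by_cases hxs : xs = []
  · subst hxs; simp [pvChop_nil]
  · have hlen : t ≤ xs.length := Nat.le_of_dvd (by
      cases Nat.eq_zero_or_pos xs.length with
      | inl h => exact absurd (List.eq_nil_of_length_eq_zero h) hxs
      | inr h => exact h) hdvd
    have hne : xs ++ ys ≠ [] := by simp [hxs]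
    rw [pvChop_cons t ht _ hne, pvChop_cons t ht xs hxs]
    rw [List.take_append_of_le_length hlen, List.drop_append_of_le_length hlen]
    rw [pvChop_append t ht (xs.drop t) ys (by simp [List.length_drop]; exact Or.inl hdvd)]
    simp
termination_by xs.length
decreasing_by simp [List.length_drop]; omega

theorem pvRangeChunks (t : Nat) (ht : 0 < t) :
    ∀ (c : Nat) (ds : List Char), ds.length = t * c →
      (List.range c).map (fun k => (ds.drop (t * k)).take t) = pvChop t ds := by
  intro c
  induction c with
  | zero =>
    intro ds hlen
    have : ds = [] := List.eq_nil_of_length_eq_zero (by omega)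
    subst this; simp [pvChop_nil]
  | succ c ih =>
    intro ds hlen
    have hne : ds ≠ [] := by
      intro h; subst h; simp at hlen; omega
    rw [pvChop_cons t ht ds hne, List.range_succ_eq_map, List.map_cons, List.map_map]
    congr 1
    have hlen' : ds.length = t * c + t := by rw [hlen, Nat.mul_succ]
    rw [← ih (ds.drop t) (by rw [List.length_drop]; exact Nat.sub_eq_of_eq_add hlen')]
    apply List.map_congr_left
    intro k _
    simp only [Function.comp]
    rw [List.drop_drop]
    congr 2
    rw [Nat.mul_succ]
    omega

theorem pvA_chunks (t : Nat) (ht : 0 < t) (ds : List Char) (hdvd : t ∣ ds.length) :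
    (PySem.List.pyRange 0 (ds.length : Int) (t : Int)).map
      (fun i => PySem.List.slice ds (some i) (some (i + (t : Int)))) = pvChop t ds := by
  obtain ⟨c, hc⟩ := hdvd
  have ht' : (0 : Int) < (t : Int) := by exact_mod_cast ht
  rw [PySem.List.pyRange_of_pos 0 (ds.length : Int) ht']
  rcases Nat.eq_zero_or_pos c with hc0 | hc0
  · subst hc0
    have : ds = [] := List.eq_nil_of_length_eq_zero (by omega)
    subst this
    simp [pvChop_nil]
  · have hpos : (0 : Int) < (ds.length : Int) := by
      have : 0 < ds.length := by
        rw [hc]; exact Nat.mul_pos ht hc0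
      exact_mod_cast this
    have hcount : (if (0:Int) < (ds.length : Int) then (((ds.length : Int) - 0 + (t:Int) - 1) / (t:Int)).toNat else 0) = c := by
      rw [if_pos hpos]
      have h1 : ((ds.length : Int) - 0 + (t:Int) - 1) = ((t:Int) - 1) + (c:Int) * (t:Int) := by
        rw [hc]; push_cast; ring
      rw [h1, Int.add_mul_ediv_right _ _ (by omega : (t:Int) ≠ 0)]
      rw [Int.ediv_eq_zero_of_lt (by omega) (by omega)]
      simp
    rw [hcount, List.map_map]
    rw [← pvRangeChunks t ht c ds hc]
    apply List.map_congr_left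
    intro k _
    simp only [Function.comp]
    have h2 : (0 : Int) + (t:Int) * (k:Int) = ((t*k : Nat) : Int) := by push_cast; ring
    rw [h2, PySem.List.slice_natCast_add ds (t*k) t]

theorem pvDvdBase (t p i : Nat) (ht : 0 < t) (hi : 0 < i) (hp : p < t) (hit : i ≤ t)
    (hdvd : t ∣ (p + i)) : p + i = t := by
  obtain ⟨c, hc⟩ := hdvd
  rcases c with _ | _ | c
  · omega
  · rw [Nat.mul_one] at hc; omega
  · have h2 : t * (c + 2) = t * c + 2 * t := by ring
    rw [h2] at hc
    generalize t * c = m at hc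
    omega

theorem pvDvdStep (t p i : Nat) (ht : 0 < t) (hit : t < i) (hdvd : t ∣ (p + i)) :
    t ∣ (p + (i - t)) := by
  obtain ⟨c, hc⟩ := hdvd
  rcases c with _ | c
  · omega
  · refine ⟨c, ?_⟩
    rw [Nat.mul_succ] at hc
    generalize t * c = m at hc ⊢
    omega

theorem pvChunksL_eq (t : Nat) (ht : 0 < t) (i : Nat) (cs : List Char) (p : Nat)
    (hi : 0 < i) (hp : p < t) (hdvd : t ∣ (p + i)) (hle : i ≤ cs.length) :
    pvChunksL cs (t : Int) i = pvChop t (List.replicate p '0' ++ cs.take i) := by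
  by_cases hit : i ≤ t
  · have hcond : ((i : Int) ≤ (t : Int) ∨ (t : Int) ≤ 0) := Or.inl (by exact_mod_cast hit)
    rw [pvChunksL, dif_pos hcond]
    have hpi : p + i = t := pvDvdBase t p i ht hi hp hit hdvd
    have hrep : ((t : Int) - (i : Int)).toNat = p := by omega
    rw [hrep]
    rw [pvChop_full t ht _ (by simp [List.length_take]; omega)]
  · push_neg at hit
    have hcond : ¬((i : Int) ≤ (t : Int) ∨ (t : Int) ≤ 0) := by
      push_neg; exact ⟨by exact_mod_cast hit, by exact_mod_cast ht⟩
    rw [pvChunksL, dif_neg hcond]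
    have htn : (t : Int).toNat = t := by simp
    rw [htn]
    rw [pvChunksL_eq t ht (i - t) cs p (by omega) hp (pvDvdStep t p i ht hit hdvd) (by omega)]
    have hsplit : cs.take i = cs.take (i - t) ++ (cs.drop (i - t)).take t := by
      conv_lhs => rw [show i = (i - t) + t from by omega]
      rw [List.take_add]
    rw [hsplit, ← List.append_assoc]
    rw [pvChop_append t ht (List.replicate p '0' ++ cs.take (i - t)) ((cs.drop (i - t)).take t) (by
      have hlen : (List.replicate p '0' ++ cs.take (i - t)).length = p + (i - t) := by
        simp [List.length_take]; omega
      rw [hlen]; exact pvDvdStep t p i ht hit hdvd)]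
    congr 1
    exact (pvChop_full t ht _ (by simp [List.length_take, List.length_drop]; omega)).symm
termination_by i

theorem pvDvdR (t p n i : Nat) (ht : 0 < t) (hp : p < t) (hin : i < n) (hni : n - i ≤ t)
    (hd1 : t ∣ (n + p)) (hd2 : t ∣ i) : (n - i) + p = t := by
  obtain ⟨c, hc⟩ := hd1
  obtain ⟨d, hd⟩ := hd2
  have hdc : d < c := by
    by_contra hcon
    push_neg at hcon
    have : t * c ≤ t * d := Nat.mul_le_mul_left t hcon
    omega
  obtain ⟨e, he⟩ : ∃ e, c = d + e := ⟨c - d, by omega⟩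
  subst he
  rw [Nat.mul_add] at hc
  rcases e with _ | _ | e
  · omega
  · rw [Nat.mul_one] at hc; omega
  · have h2 : t * (e + 2) = t * e + 2 * t := by ring
    rw [h2] at hc
    generalize t * d = A at hc hd
    generalize t * e = B at hc
    omega

theorem pvChunksR_eq (t : Nat) (ht : 0 < t) (cs : List Char) (p : Nat)
    (hp : p < t) (hdvd : t ∣ (cs.length + p)) (i : Nat) (hin : i < cs.length) (hi : t ∣ i) :
    pvChunksR cs (t : Int) i = pvChop t (cs.drop i ++ List.replicate p '0') := by
  by_cases hbase : cs.length - i ≤ t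
  · have hcond : ((cs.length : Int) - (i : Int) ≤ (t : Int) ∨ (t : Int) ≤ 0) := Or.inl (by omega)
    rw [pvChunksR, dif_pos hcond]
    have hpi : (cs.length - i) + p = t := pvDvdR t p cs.length i ht hp hin hbase hdvd hi
    have hrep : ((t : Int) - ((cs.length : Int) - (i : Int))).toNat = p := by omega
    rw [hrep]
    rw [pvChop_full t ht _ (by simp [List.length_drop]; omega)]
  · push_neg at hbase
    have hcond : ¬((cs.length : Int) - (i : Int) ≤ (t : Int) ∨ (t : Int) ≤ 0) := by
      push_neg; constructor <;> omega
    rw [pvChunksR, dif_neg hcond]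
    have htn : (t : Int).toNat = t := by simp
    rw [htn]
    have hlen : t ≤ (cs.drop i).length := by simp [List.length_drop]; omega
    have hne : cs.drop i ++ List.replicate p '0' ≠ [] := by
      intro h
      have := congrArg List.length h
      simp [List.length_drop] at this
      omega
    rw [pvChop_cons t ht _ hne]
    rw [List.take_append_of_le_length hlen, List.drop_append_of_le_length hlen]
    rw [List.drop_drop]
    rw [pvChunksR_eq t ht cs p hp hdvd (i + t) (by omega) (by exact Nat.dvd_add hi (dvd_refl t))]
termination_by cs.length - i


theorem pvMain_left (t : Nat) (ht : 0 < t) (cs : List Char) (hnil : cs ≠ [])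
    (p : Nat) (hp : p < t) (hdvd : t ∣ (p + cs.length)) :
    (PySem.List.pyRange 0 ((List.replicate p '0' ++ cs).length : Int) (t : Int)).map
      (fun i => String.ofList (PySem.List.slice (List.replicate p '0' ++ cs) (some i) (some (i + (t : Int))))) =
    (pvLoopL cs (t : Int) cs.length []).map String.ofList := by
  rw [pvLoopL_eq, List.reverse_nil, List.append_nil]
  have hlen0 : 0 < cs.length := List.length_pos_iff.mpr hnil
  have hdvd' : t ∣ (List.replicate p '0' ++ cs).length := by
    simpa [List.length_append] using hdvd
  rw [show (fun i => String.ofList (PySem.List.slice (List.replicate p '0' ++ cs) (some i) (some (i + (t : Int))))) =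
        String.ofList ∘ (fun i => PySem.List.slice (List.replicate p '0' ++ cs) (some i) (some (i + (t : Int)))) from rfl]
  rw [← List.map_map]
  rw [pvA_chunks t ht _ hdvd']
  rw [pvChunksL_eq t ht cs.length cs p hlen0 hp hdvd (le_refl _)]
  rw [List.take_length]

theorem pvMain_right (t : Nat) (ht : 0 < t) (cs : List Char) (hnil : cs ≠ [])
    (p : Nat) (hp : p < t) (hdvd : t ∣ (cs.length + p)) :
    (PySem.List.pyRange 0 ((cs ++ List.replicate p '0').length : Int) (t : Int)).map
      (fun i => String.ofList (PySem.List.slice (cs ++ List.replicate p '0') (some i) (some (i + (t : Int))))) =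
    (pvLoopR cs (t : Int) 0 []).map String.ofList := by
  rw [pvLoopR_eq, List.nil_append]
  have hlen0 : 0 < cs.length := List.length_pos_iff.mpr hnil
  have hdvd' : t ∣ (cs ++ List.replicate p '0').length := by
    simpa [List.length_append] using hdvd
  rw [show (fun i => String.ofList (PySem.List.slice (cs ++ List.replicate p '0') (some i) (some (i + (t : Int))))) =
        String.ofList ∘ (fun i => PySem.List.slice (cs ++ List.replicate p '0') (some i) (some (i + (t : Int)))) from rfl]
  rw [← List.map_map]
  rw [pvA_chunks t ht _ hdvd']
  rw [pvChunksR_eq t ht cs p hp hdvd 0 hlen0 (dvd_zero t)]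
  rw [List.drop_zero]

-- ===== VERDICT (by name: the statement is the Claim_ definition above) =====
theorem agrupar_binario_spec : Claim_equal_agrupar_binario := by
  intro bits tam izquierda _hdom hpre
  unfold Spec_agrupar_binario
  unfold agrupar_binario agrupar_binario_alt
  by_cases hnil : bits.toList = []
  · simp [hnil]
  · have htam : 1 ≤ tam := by
      rcases hpre with h | h
      · exact absurd h hnil
      · exact h
    set cs := bits.toList with hcs
    set t := tam.toNat with htdef
    have ht : 0 < t := by omega
    have htt : tam = (t : Int) := by omega
    have hlen0 : 0 < cs.length := List.length_pos_iff.mpr hnil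
    set r := cs.length % t with hrdef
    have hr_lt : r < t := Nat.mod_lt _ ht
    have hq : t * (cs.length / t) + r = cs.length := Nat.div_add_mod cs.length t
    have hmod : PySem.Int.mod (cs.length : Int) ((t : Nat) : Int) = ((r : Nat) : Int) :=
      PySem.Int.mod_natCast cs.length t
    simp only [hnil, if_false, htt]
    rw [hmod]
    by_cases hr : r = 0
    · have hdvd : t ∣ cs.length := Nat.dvd_of_mod_eq_zero hr
      have hcond : ¬(((r : Nat) : Int) ≠ 0) := by simp [hr]
      rw [if_neg hcond, if_neg hcond]
      by_cases hiz : izquierda = true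
      · simp only [hiz, eq_self_iff_true, if_true]
        have := pvMain_left t ht cs hnil 0 ht (by simpa using hdvd)
        simpa using this
      · have hiz' : izquierda = false := by
          cases izquierda
          · rfl
          · exact absurd rfl hiz
        simp only [hiz', Bool.false_eq_true, if_false]
        have := pvMain_right t ht cs hnil 0 ht (by simpa using hdvd)
        simpa using this
    · have hrne : ((r : Nat) : Int) ≠ 0 := by exact_mod_cast hr
      have hpnat : ((t : Int) - ((r : Nat) : Int)).toNat = t - r := by omega
      have hp_lt : t - r < t := by omega
      have hdvdL : t ∣ ((t - r) + cs.length) := by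
        refine ⟨cs.length / t + 1, ?_⟩
        have h2 : t * (cs.length / t + 1) = t * (cs.length / t) + t := by ring
        rw [h2]
        omega
      have hdvdR : t ∣ (cs.length + (t - r)) := by
        rwa [Nat.add_comm] at hdvdL
      rw [if_pos hrne, if_pos hrne, hpnat]
      by_cases hiz : izquierda = true
      · simp only [hiz, eq_self_iff_true, if_true]
        exact pvMain_left t ht cs hnil (t - r) hp_lt hdvdL
      · have hiz' : izquierda = false := by
          cases izquierda
          · rfl
          · exact absurd rfl hiz
        simp only [hiz', Bool.false_eq_true, if_false]
        exact pvMain_right t ht cs hnil (t - r) hp_lt hdvdR
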